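-- pv_equiv track=rewrite | github.com/CODING-TEST-ANYMORE/Coding-Test-Study | 03-Heap/eugene/더맵게.py | solution
-- ===== SOURCE A (Python) =====
-- import heapq
--
-- def solution(scoville, K):
--     cnt = 0
--     heapq.heapify(scoville)
--     while True:
--         min_sco = heapq.heappop(scoville) # 제일 앞에 있는 값이 나옴
--         if min_sco >= K: # 맨 앞 값이 K보다 클 경우
--             return cnt
--         if len(scoville) <= 0:
--             return -1
--         sec_min = heapq.heappop(scoville)
--         heapq.heappush(scoville, min_sco + sec_min * 2) # 특별한 방법으로 섞기
--         cnt += 1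
-- ===== SOURCE B (Python) =====
-- def solution(scoville, K):
--     # Two-queue merge technique: sort once, then no priority queue is needed.
--     # Newly merged values come out in non-decreasing order, so a plain FIFO
--     # queue of merged values replaces the heap; each minimum is the smaller
--     # of the two queue fronts.
--     src = sorted(scoville)
--     merged = []
--     cnt = 0
--     while True:
--         m = _take(src, merged)
--         if m >= K:
--             return cnt
--         if not src and not merged:
--             return -1
--         m2 = _take(src, merged)
--         merged.append(m + m2 * 2)
--         cnt += 1
--
--
-- def _take(src, merged):
--     if src and (not merged or src[0] <= merged[0]):
--         return src.pop(0)
--     return merged.pop(0)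
-- ===== Notes on version B (the rewrite author's own statement) =====
-- stated objective: alternative
-- what changed: Replaces the running binary heap with the two-queue merge technique: sort once, keep merged values in a plain FIFO queue (they are provably produced in non-decreasing order), and take each minimum by comparing the two queue fronts; unlike A it does not mutate the argument.
import Mathlib
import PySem

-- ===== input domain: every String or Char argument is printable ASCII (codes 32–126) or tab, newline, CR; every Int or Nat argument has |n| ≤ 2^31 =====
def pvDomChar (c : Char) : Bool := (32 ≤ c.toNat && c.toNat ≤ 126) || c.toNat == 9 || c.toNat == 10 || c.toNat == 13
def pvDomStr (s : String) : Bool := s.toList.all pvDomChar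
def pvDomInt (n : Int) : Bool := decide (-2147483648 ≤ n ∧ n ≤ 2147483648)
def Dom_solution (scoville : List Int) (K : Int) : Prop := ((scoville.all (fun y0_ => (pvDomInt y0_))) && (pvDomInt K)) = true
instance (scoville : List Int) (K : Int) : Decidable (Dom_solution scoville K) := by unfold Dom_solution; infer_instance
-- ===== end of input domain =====

-- B replaces A's binary heap by the two-queue merge technique (sort once; merged values are
-- produced in non-decreasing order, so a plain FIFO queue plus a front comparison replaces the
-- heap); equivalence is about the RETURN value only — A mutates the argument list into a heap
-- while B leaves it untouched.

-- ===== PORT A =====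
-- heapq is a library: its operations are ported by their contract on the stored multiset —
-- heapify keeps the contents, heappop removes and returns the minimum, heappush adds an
-- element.  The return value of `solution` depends only on that multiset view, so the port
-- is exact on it; the heap-ordered residual layout of the mutated argument is not modeled.
def solutionLoop (l : List Int) (K cnt : Int) : Int :=
  match h : PySem.List.min? l (fun y => y) with
  | none => -1                      -- heappop from an empty heap raises; outside Pre_
  | some m =>                       -- min_sco = heapq.heappop(scoville); l.erase m is the popped heap's contents
    if m ≥ K then cnt
    else if (l.erase m).length ≤ 0 then -1
    else
      match h2 : PySem.List.min? (l.erase m) (fun y => y) with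
      | none => -1                  -- unreachable: the list is nonempty here
      | some m2 =>                  -- sec_min = heapq.heappop(scoville)
        solutionLoop ((m + m2 * 2) :: (l.erase m).erase m2) K (cnt + 1)
termination_by l.length
decreasing_by
  have hm : m ∈ l := PySem.List.min?_mem h
  have hm2 : m2 ∈ l.erase m := PySem.List.min?_mem h2
  have h1 : (l.erase m).length = l.length - 1 := List.length_erase_of_mem hm
  have h2' : ((l.erase m).erase m2).length = (l.erase m).length - 1 := List.length_erase_of_mem hm2
  simp only [List.length_cons]
  have _h4 : 0 < (l.erase m).length := List.length_pos_of_mem hm2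
  omega

def solution (scoville : List Int) (K : Int) : Int :=
  solutionLoop scoville K 0

-- ===== PORT B =====
-- _take(src, merged): pop the smaller front of the two queues (src preferred on ties);
-- returns the popped value and the two remaining queues.  none = pop(0) from two empty
-- lists (IndexError; outside Pre_).
def altTake : List Int → List Int → Option (Int × List Int × List Int)
  | x :: st, [] => some (x, st, [])
  | x :: st, y :: mt => if x ≤ y then some (x, st, y :: mt) else some (y, x :: st, mt)
  | [], y :: mt => some (y, [], mt)
  | [], [] => none

def altLoop (src merged : List Int) (K cnt : Int) : Int :=
  match h : altTake src merged with
  | none => -1                      -- _take on two empty lists raises; outside Pre_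
  | some (m, s1, m1) =>             -- m = _take(src, merged)
    if m ≥ K then cnt
    else if s1 = [] ∧ m1 = [] then -1   -- if not src and not merged
    else
      match h2 : altTake s1 m1 with
      | none => -1                  -- unreachable: some queue is nonempty here
      | some (m2, s2, m2q) =>       -- m2 = _take(src, merged); merged.append(m + m2 * 2)
        altLoop s2 (m2q ++ [m + m2 * 2]) K (cnt + 1)
termination_by src.length + merged.length
decreasing_by
  have e1 : s1.length + m1.length + 1 = src.length + merged.length := by
    match src, merged, h with
    | x :: st, [], h => injection h with h; cases h; simp
    | x :: st, y :: mt, h =>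
      by_cases hxy : x ≤ y <;> simp [altTake, hxy] at h <;>
        obtain ⟨_h1, h2, h3⟩ := h <;> subst h2 <;> subst h3 <;> simp <;> omega
    | [], y :: mt, h => injection h with h; cases h; simp
  have e2 : s2.length + m2q.length + 1 = s1.length + m1.length := by
    match s1, m1, h2 with
    | x :: st, [], h2 => injection h2 with h2; cases h2; simp
    | x :: st, y :: mt, h2 =>
      by_cases hxy : x ≤ y <;> simp [altTake, hxy] at h2 <;>
        obtain ⟨_h1, h2', h3⟩ := h2 <;> subst h2' <;> subst h3 <;> simp <;> omega
    | [], y :: mt, h2 => injection h2 with h2; cases h2; simp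
  simp only [List.length_append, List.length_singleton]
  omega

def solution_alt (scoville : List Int) (K : Int) : Int :=
  altLoop (PySem.List.sorted scoville (fun y => y) false) [] K 0

-- ===== PRECONDITION & SPEC =====
-- Pre_ excludes only the empty list, on which A raises IndexError (heappop from an empty heap).
def Pre_solution (scoville : List Int) (_K : Int) : Prop := scoville ≠ []
instance (scoville : List Int) (K : Int) : Decidable (Pre_solution scoville K) := by
  unfold Pre_solution; infer_instance

def pvWitness_solution : List Int × Int := ([1, 2, 3, 9, 10, 12], 7)

def Spec_solution (scoville : List Int) (K : Int) (out : Int) : Prop := out = solution_alt scoville K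
instance (scoville : List Int) (K : Int) (out : Int) : Decidable (Spec_solution scoville K out) := by unfold Spec_solution; infer_instance

-- ===== CLAIM (what is proved, stated in full; the proofs are below) =====
def Claim_equal_solution : Prop := ∀ (scoville : List Int) (K : Int), Dom_solution scoville K → Pre_solution scoville K → Spec_solution scoville K (solution scoville K)

-- ===== LEMMAS AND PROOFS =====

-- the minimum over any list permutation-equal to one whose minimum value is m
theorem min?_eq_of {l r : List Int} {m : Int} (hp : l.Perm r) (hm : m ∈ r)
    (hmin : ∀ x ∈ r, m ≤ x) : PySem.List.min? l (fun y => y) = some m := by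
  cases h : PySem.List.min? l (fun y => y) with
  | none =>
    have : l = [] := (PySem.List.min?_eq_none_iff l (fun y => y)).mp h
    subst this
    exact absurd (hp.mem_iff.mpr hm) (by simp)
  | some m' =>
    have h1 : m' ∈ r := hp.mem_iff.mp (PySem.List.min?_mem h)
    have h2 : ∀ y ∈ l, m' ≤ y := by
      intro y hy; simpa using PySem.List.min?_isMin h y hy
    have hle : m ≤ m' := hmin m' h1
    have hge : m' ≤ m := h2 m (hp.mem_iff.mpr hm)
    rw [le_antisymm hge hle]

theorem altTake_none_iff (s m : List Int) :
    altTake s m = none ↔ s = [] ∧ m = [] := by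
  match s, m with
  | [], [] => simp [altTake]
  | x :: st, [] => simp [altTake]
  | [], y :: mt => simp [altTake]
  | x :: st, y :: mt => by_cases hxy : x ≤ y <;> simp [altTake, hxy]

theorem altTake_perm {s m : List Int} {v : Int} {s' m' : List Int}
    (h : altTake s m = some (v, s', m')) : (v :: (s' ++ m')).Perm (s ++ m) := by
  match s, m, h with
  | x :: st, [], h => injection h with h; cases h; simp
  | [], y :: mt, h => injection h with h; cases h; simp
  | x :: st, y :: mt, h =>
    by_cases hxy : x ≤ y <;> simp [altTake, hxy] at h <;>
      obtain ⟨h1, h2, h3⟩ := h <;> subst h1 <;> subst h2 <;> subst h3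
    · simp
    · exact List.perm_middle.symm

theorem altTake_min {s m : List Int} {v : Int} {s' m' : List Int}
    (hs : s.Pairwise (· ≤ ·)) (hm : m.Pairwise (· ≤ ·))
    (h : altTake s m = some (v, s', m')) : ∀ x ∈ s ++ m, v ≤ x := by
  match s, m, h with
  | x :: st, [], h =>
    injection h with h; cases h
    intro z hz
    rcases List.mem_append.mp hz with hz | hz
    · rcases List.mem_cons.mp hz with rfl | hz
      · exact le_refl _
      · exact (List.pairwise_cons.mp hs).1 z hz
    · simp at hz
  | [], y :: mt, h =>
    injection h with h; cases h
    intro z hz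
    simp only [List.nil_append] at hz
    rcases List.mem_cons.mp hz with rfl | hz
    · exact le_refl _
    · exact (List.pairwise_cons.mp hm).1 z hz
  | x :: st, y :: mt, h =>
    by_cases hxy : x ≤ y <;> simp [altTake, hxy] at h <;>
      obtain ⟨h1, h2, h3⟩ := h <;> subst h1 <;> subst h2 <;> subst h3 <;>
      intro z hz <;> rcases List.mem_append.mp hz with hz | hz
    · rcases List.mem_cons.mp hz with rfl | hz
      · exact le_refl _
      · exact (List.pairwise_cons.mp hs).1 z hz
    · rcases List.mem_cons.mp hz with rfl | hz
      · exact hxy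
      · exact le_trans hxy ((List.pairwise_cons.mp hm).1 z hz)
    · rcases List.mem_cons.mp hz with rfl | hz
      · omega
      · exact le_trans (by omega) ((List.pairwise_cons.mp hs).1 z hz)
    · rcases List.mem_cons.mp hz with rfl | hz
      · exact le_refl _
      · exact (List.pairwise_cons.mp hm).1 z hz

-- the remaining queues are the originals or their tails
theorem altTake_shape {s m : List Int} {v : Int} {s' m' : List Int}
    (h : altTake s m = some (v, s', m')) :
    (s' = s ∨ s' = s.tail) ∧ (m' = m ∨ m' = m.tail) := by
  match s, m, h with
  | x :: st, [], h => injection h with h; cases h; exact ⟨Or.inr rfl, Or.inl rfl⟩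
  | [], y :: mt, h => injection h with h; cases h; exact ⟨Or.inl rfl, Or.inr rfl⟩
  | x :: st, y :: mt, h =>
    by_cases hxy : x ≤ y <;> simp [altTake, hxy] at h <;>
      obtain ⟨h1, h2, h3⟩ := h <;> subst h1 <;> subst h2 <;> subst h3
    · exact ⟨Or.inr rfl, Or.inl rfl⟩
    · exact ⟨Or.inl rfl, Or.inr rfl⟩

-- if the merged queue is not emptied, the popped value lies before the merged queue's last slot
theorem altTake_mem_dropLast {s m : List Int} {v : Int} {s' m' : List Int}
    (h : altTake s m = some (v, s', m')) (hne : m' ≠ []) :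
    v ∈ s ∨ v ∈ m.dropLast := by
  cases s with
  | nil =>
    cases m with
    | nil => simp [altTake] at h
    | cons y mt =>
      simp [altTake] at h
      obtain ⟨rfl, rfl, rfl⟩ := h
      cases mt with
      | nil => exact absurd rfl hne
      | cons c mt' => exact Or.inr (by simp [List.dropLast_cons₂])
  | cons x st =>
    cases m with
    | nil =>
      simp [altTake] at h
      obtain ⟨rfl, rfl, rfl⟩ := h
      exact Or.inl (by simp)
    | cons y mt =>
      by_cases hxy : x ≤ y <;> simp [altTake, hxy] at h <;> obtain ⟨rfl, rfl, rfl⟩ := h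
      · exact Or.inl (by simp)
      · cases mt with
        | nil => exact absurd rfl hne
        | cons c mt' => exact Or.inr (by simp [List.dropLast_cons₂])

theorem mem_dropLast_tail {x : Int} {l : List Int} (h : x ∈ l.tail.dropLast) :
    x ∈ l.dropLast := by
  match l with
  | [] => simp at h
  | [a] => simp at h
  | a :: b :: t => simp only [List.tail_cons] at h; simp [List.dropLast_cons₂, h]

theorem pairwise_tail {l : List Int} (h : l.Pairwise (· ≤ ·)) :
    l.tail.Pairwise (· ≤ ·) := by
  match l with
  | [] => exact List.Pairwise.nil
  | a :: t => exact (List.pairwise_cons.mp h).2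

theorem le_getLast {l : List Int} {L : Int} (hs : l.Pairwise (· ≤ ·))
    (hL : l.getLast? = some L) : ∀ x ∈ l, x ≤ L := by
  obtain ⟨l', rfl⟩ := List.getLast?_eq_some_iff.mp hL
  intro x hx
  rcases List.mem_append.mp hx with hx | hx
  · exact (List.pairwise_append.mp hs).2.2 x hx L (by simp)
  · simp at hx; omega

-- Loop invariant of B: both queues sorted, and the merged queue's last element (the latest
-- append) is a + 2*b for the two minima a ≤ b of the round that produced it, every element
-- before that slot being ≥ b.  This is what makes the next append keep the queue sorted.
def InvTQ (s m : List Int) : Prop :=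
  s.Pairwise (· ≤ ·) ∧ m.Pairwise (· ≤ ·) ∧
  ∀ L, m.getLast? = some L →
    ∃ a b, a ≤ b ∧ L = a + 2 * b ∧ ∀ x ∈ s ++ m.dropLast, b ≤ x

theorem loopA_nil (K cnt : Int) : solutionLoop [] K cnt = -1 := by
  rw [solutionLoop.eq_def]
  split
  · rfl
  · rename_i m h
    simp [PySem.List.min?] at h

theorem loopA_step {l : List Int} {m : Int} (K cnt : Int)
    (hmin : PySem.List.min? l (fun y => y) = some m) :
    solutionLoop l K cnt =
      if m ≥ K then cnt
      else if (l.erase m).length ≤ 0 then -1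
      else
        match PySem.List.min? (l.erase m) (fun y => y) with
        | none => -1
        | some m2 => solutionLoop ((m + m2 * 2) :: (l.erase m).erase m2) K (cnt + 1) := by
  rw [solutionLoop.eq_def]
  split
  · rename_i h
    rw [hmin] at h; exact absurd h (by simp)
  · rename_i m' h
    rw [hmin] at h
    injection h with h; subst h
    split_ifs with h1 h2
    · rfl
    · rfl
    · split
      · rename_i h3; rw [h3]
      · rename_i m2 h3; rw [h3]

theorem loopB_none (s m : List Int) (K cnt : Int) (h : altTake s m = none) :
    altLoop s m K cnt = -1 := by
  rw [altLoop.eq_def]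
  split
  · rfl
  · rename_i p h'
    rw [h] at h'; exact absurd h' (by simp)

theorem loopB_step {s m : List Int} {v : Int} {s1 m1 : List Int} (K cnt : Int)
    (h : altTake s m = some (v, s1, m1)) :
    altLoop s m K cnt =
      if v ≥ K then cnt
      else if s1 = [] ∧ m1 = [] then -1
      else
        match altTake s1 m1 with
        | none => -1
        | some (v2, s2, m2q) => altLoop s2 (m2q ++ [v + v2 * 2]) K (cnt + 1) := by
  rw [altLoop.eq_def]
  split
  · rename_i h'
    rw [h] at h'; exact absurd h' (by simp)
  · rename_i v' s1' m1' h'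
    rw [h] at h'
    injection h' with h'
    injection h' with hA h'
    injection h' with hB hC
    subst hA; subst hB; subst hC
    split_ifs with h1 h2
    · rfl
    · rfl
    · split
      · rename_i h3; rw [h3]
      · rename_i p2 h3; rw [h3]

theorem loop_eq : ∀ (n : Nat) (l s m : List Int) (K cnt : Int),
    l.length ≤ n → l.Perm (s ++ m) → InvTQ s m →
    solutionLoop l K cnt = altLoop s m K cnt := by
  intro n
  induction n with
  | zero =>
    intro l s m K cnt hlen hp _
    have hl : l = [] := List.length_eq_zero_iff.mp (by omega)
    subst hl
    have hsm : s ++ m = [] := List.length_eq_zero_iff.mp (by simpa using hp.length_eq.symm)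
    rw [loopA_nil, loopB_none]
    rw [altTake_none_iff]
    exact List.append_eq_nil_iff.mp hsm
  | succ n ih =>
    intro l s m K cnt hlen hp hJ
    obtain ⟨hsS, hmS, hLast⟩ := hJ
    cases htk : altTake s m with
    | none =>
      have hsm := (altTake_none_iff s m).mp htk
      have hl : l = [] := List.length_eq_zero_iff.mp
        (by rw [hp.length_eq]; simp [hsm.1, hsm.2])
      subst hl
      rw [loopA_nil, loopB_none _ _ _ _ htk]
    | some p =>
      obtain ⟨v, s1, m1⟩ := p
      have hperm1 : (v :: (s1 ++ m1)).Perm (s ++ m) := altTake_perm htk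
      have hvmem : v ∈ s ++ m := hperm1.mem_iff.mp (by simp)
      have hvmin : ∀ x ∈ s ++ m, v ≤ x := altTake_min hsS hmS htk
      have hminA : PySem.List.min? l (fun y => y) = some v := min?_eq_of hp hvmem hvmin
      rw [loopA_step K cnt hminA, loopB_step K cnt htk]
      by_cases hK : v ≥ K
      · rw [if_pos hK, if_pos hK]
      · rw [if_neg hK, if_neg hK]
        have hpe : (l.erase v).Perm (s1 ++ m1) := by
          have h1 : (l.erase v).Perm ((v :: (s1 ++ m1)).erase v) :=
            (hp.trans hperm1.symm).erase v
          simpa [List.erase_cons_head] using h1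
        have hlen1 : (l.erase v).length = (s1 ++ m1).length := hpe.length_eq
        by_cases hend : s1 = [] ∧ m1 = []
        · rw [if_pos hend]
          rw [if_pos (by simp [hlen1, hend.1, hend.2])]
        · rw [if_neg hend]
          have hne : s1 ++ m1 ≠ [] := by
            intro hc
            exact hend (List.append_eq_nil_iff.mp hc)
          rw [if_neg (by
            simp only [hlen1]
            have := List.length_pos_iff.mpr hne
            omega)]
          have hs1S : s1.Pairwise (· ≤ ·) := by
            rcases (altTake_shape htk).1 with rfl | rfl
            · exact hsS
            · exact pairwise_tail hsS
          have hm1S : m1.Pairwise (· ≤ ·) := by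
            rcases (altTake_shape htk).2 with rfl | rfl
            · exact hmS
            · exact pairwise_tail hmS
          cases htk2 : altTake s1 m1 with
          | none => exact absurd ((altTake_none_iff s1 m1).mp htk2) hend
          | some p2 =>
            obtain ⟨v2, s2, m2q⟩ := p2
            have hperm2 : (v2 :: (s2 ++ m2q)).Perm (s1 ++ m1) := altTake_perm htk2
            have hv2mem : v2 ∈ s1 ++ m1 := hperm2.mem_iff.mp (by simp)
            have hv2min : ∀ x ∈ s1 ++ m1, v2 ≤ x := altTake_min hs1S hm1S htk2
            have hminA2 : PySem.List.min? (l.erase v) (fun y => y) = some v2 :=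
              min?_eq_of hpe hv2mem hv2min
            rw [hminA2]
            -- set up the recursive call
            have hpe2 : ((l.erase v).erase v2).Perm (s2 ++ m2q) := by
              have h1 : ((l.erase v).erase v2).Perm ((v2 :: (s2 ++ m2q)).erase v2) :=
                (hpe.trans hperm2.symm).erase v2
              simpa [List.erase_cons_head] using h1
            have hvv2 : v ≤ v2 := hvmin v2 (hperm1.mem_iff.mp (by simp [hv2mem]))
            -- membership transfer: elements of s2 ++ m2q are elements of s1 ++ m1
            have hsub2 : ∀ x ∈ s2 ++ m2q, x ∈ s1 ++ m1 := by
              intro x hx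
              exact hperm2.mem_iff.mp (by simp [hx])
            -- merged-queue memberships are memberships in m
            have hm1sub : ∀ x ∈ m1, x ∈ m := by
              rcases (altTake_shape htk).2 with rfl | rfl
              · intro x hx; exact hx
              · intro x hx; exact List.mem_of_mem_tail hx
            have hm2qsub : ∀ x ∈ m2q, x ∈ m := by
              rcases (altTake_shape htk2).2 with rfl | rfl
              · exact hm1sub
              · intro x hx; exact hm1sub x (List.mem_of_mem_tail hx)
            -- the new merged queue stays sorted
            have hkey : ∀ x ∈ m2q, x ≤ v + v2 * 2 := by
              intro x hx
              have hm2qne : m2q ≠ [] := by intro hc; rw [hc] at hx; simp at hx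
              have hm1ne : m1 ≠ [] := by
                rcases (altTake_shape htk2).2 with rfl | rfl
                · exact hm2qne
                · intro hc; rw [hc] at hm2qne; simp at hm2qne
              have hmne : m ≠ [] := by
                intro hc; subst hc
                exact hm1ne (by rcases (altTake_shape htk).2 with rfl | rfl <;> simp_all)
              obtain ⟨L, hL⟩ : ∃ L, m.getLast? = some L := by
                cases hh : m.getLast? with
                | none => exact absurd (List.getLast?_eq_none_iff.mp hh) hmne
                | some L => exact ⟨L, rfl⟩
              obtain ⟨a, b, hab, hLab, hb⟩ := hLast L hL
              -- x ≤ L since m is sorted and x ∈ m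
              have hxm : x ∈ m := hm2qsub x hx
              have hxL : x ≤ L := le_getLast hmS hL x hxm
              -- v ≥ b
              have hbv : b ≤ v := by
                rcases altTake_mem_dropLast htk hm1ne with hv | hv
                · exact hb v (List.mem_append.mpr (Or.inl hv))
                · exact hb v (List.mem_append.mpr (Or.inr hv))
              -- v2 ≥ b
              have hbv2 : b ≤ v2 := by
                rcases altTake_mem_dropLast htk2 hm2qne with hv2 | hv2
                · -- v2 ∈ s1 ⊆ s
                  have : v2 ∈ s := by
                    rcases (altTake_shape htk).1 with rfl | rfl
                    · exact hv2
                    · exact List.mem_of_mem_tail hv2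
                  exact hb v2 (List.mem_append.mpr (Or.inl this))
                · -- v2 ∈ m1.dropLast ⊆ m.dropLast
                  have : v2 ∈ m.dropLast := by
                    rcases (altTake_shape htk).2 with rfl | rfl
                    · exact hv2
                    · exact mem_dropLast_tail hv2
                  exact hb v2 (List.mem_append.mpr (Or.inr this))
              omega
            have hs2S : s2.Pairwise (· ≤ ·) := by
              rcases (altTake_shape htk2).1 with rfl | rfl
              · exact hs1S
              · exact pairwise_tail hs1S
            have hm2qS : m2q.Pairwise (· ≤ ·) := by
              rcases (altTake_shape htk2).2 with rfl | rfl
              · exact hm1S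
              · exact pairwise_tail hm1S
            apply ih
            · -- length bound
              have h1 : (l.erase v).length = l.length - 1 :=
                List.length_erase_of_mem (hp.mem_iff.mpr hvmem)
              have h2 : ((l.erase v).erase v2).length = (l.erase v).length - 1 :=
                List.length_erase_of_mem (hpe.mem_iff.mpr hv2mem)
              have h3 : 0 < (l.erase v).length :=
                List.length_pos_of_mem (hpe.mem_iff.mpr hv2mem)
              simp only [List.length_cons]
              omega
            · -- permutation
              refine (hpe2.cons (v + v2 * 2)).trans ?_
              have hps : ((v + v2 * 2) :: (s2 ++ m2q)).Perm ((s2 ++ m2q) ++ [v + v2 * 2]) :=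
                (List.perm_append_singleton _ _).symm
              rw [List.append_assoc] at hps
              exact hps
            · -- invariant
              refine ⟨hs2S, ?_, ?_⟩
              · rw [List.pairwise_append]
                exact ⟨hm2qS, by simp, by intro x hx y hy; simp at hy; subst hy; exact hkey x hx⟩
              · intro L hL
                rw [List.getLast?_concat] at hL
                injection hL with hL
                refine ⟨v, v2, hvv2, by omega, ?_⟩
                intro x hx
                rw [List.dropLast_concat] at hx
                exact hv2min x (hsub2 x hx)

-- ===== VERDICT (by name: the statement is the Claim_ definition above) =====
theorem solution_spec : Claim_equal_solution := by
  intro scoville K _ _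
  unfold Spec_solution solution solution_alt
  exact loop_eq scoville.length scoville _ [] K 0 (le_refl _)
    (by simpa using (PySem.List.sorted_perm scoville (fun y => y) false).symm)
    ⟨by simpa using PySem.List.sorted_pairwise scoville (fun y => y), by simp, by simp⟩
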